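-- pv_equiv track=rewrite | github.com/pkkalive/DSA | Arrays/SpecialSubsequences.py | special_subsequences
-- ===== SOURCE A (Python) =====
-- def special_subsequences(string):
--     a_count, total_count, MOD = 0, 0, 10**9 + 7
--     for s in string:
--         if s == 'A':
--             a_count += 1
--         if s == 'G':
--             total_count += a_count
--
--     return total_count % MOD
-- ===== SOURCE B (Python) =====
-- def special_subsequences(string):
--     # two-pass: precompute prefix counts of 'A', then sum them at 'G' positions
--     pa = [0] * (len(string) + 1)
--     for i, ch in enumerate(string):
--         pa[i + 1] = pa[i] + (1 if ch == 'A' else 0)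
--     total = sum(pa[i] for i, ch in enumerate(string) if ch == 'G')
--     return total % (10**9 + 7)
-- ===== Notes on version B (the rewrite author's own statement) =====
-- stated objective: alternative
-- what changed: Replaces the single incremental pass maintaining a running A-count with a two-pass table-then-scan: first build a prefix array of A-counts, then sum the table entries at G positions.
import Mathlib
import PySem

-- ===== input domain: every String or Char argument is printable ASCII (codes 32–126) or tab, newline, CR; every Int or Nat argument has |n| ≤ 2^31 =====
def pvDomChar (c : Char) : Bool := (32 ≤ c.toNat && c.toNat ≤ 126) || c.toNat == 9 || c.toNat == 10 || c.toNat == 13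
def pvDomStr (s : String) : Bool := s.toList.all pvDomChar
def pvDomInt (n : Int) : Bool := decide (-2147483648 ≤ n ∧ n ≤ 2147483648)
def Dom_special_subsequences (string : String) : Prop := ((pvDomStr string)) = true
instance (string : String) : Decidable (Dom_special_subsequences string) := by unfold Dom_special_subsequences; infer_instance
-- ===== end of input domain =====

-- B keeps A's return-value behaviour exactly; it differs only in shape (table then scan).

-- ===== PORT A =====
-- one pass: running a_count, total_count accumulated, reduced mod 10^9+7 at the end
def special_subsequences (string : String) : Int :=
  let st := string.toList.foldl
    (fun (p : Int × Int) s =>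
      let a_count := if s = 'A' then p.1 + 1 else p.1
      let total_count := if s = 'G' then p.2 + a_count else p.2
      (a_count, total_count))
    (0, 0)
  PySem.Int.mod st.2 (10 ^ 9 + 7)

-- ===== PORT B =====
-- prefix array of 'A' counts: pa[i] = number of 'A' in string[:i]
def pvPrefixA (l : List Char) : List Int :=
  l.scanl (fun acc ch => acc + (if ch = 'A' then 1 else 0)) 0

def special_subsequences_alt (string : String) : Int :=
  let l := string.toList
  let pa := pvPrefixA l
  let total := (l.zip pa).foldl (fun t cp => if cp.1 = 'G' then t + cp.2 else t) 0
  PySem.Int.mod total (10 ^ 9 + 7)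

-- ===== PRECONDITION & SPEC =====
def Spec_special_subsequences (string : String) (out : Int) : Prop := out = special_subsequences_alt string
instance (string : String) (out : Int) : Decidable (Spec_special_subsequences string out) := by unfold Spec_special_subsequences; infer_instance

-- ===== CLAIM (what is proved, stated in full; the proofs are below) =====
def Claim_equal_special_subsequences : Prop := ∀ (string : String), Dom_special_subsequences string → Spec_special_subsequences string (special_subsequences string)

-- ===== LEMMAS AND PROOFS =====

-- the two folds agree for any starting a-count and total
theorem pv_fold_eq (l : List Char) (a t : Int) :
    (l.foldl
      (fun (p : Int × Int) s =>
        let a_count := if s = 'A' then p.1 + 1 else p.1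
        let total_count := if s = 'G' then p.2 + a_count else p.2
        (a_count, total_count))
      (a, t)).2
    = (l.zip (l.scanl (fun acc ch => acc + (if ch = 'A' then 1 else 0)) a)).foldl
        (fun t cp => if cp.1 = 'G' then t + cp.2 else t) t := by
  induction l generalizing a t with
  | nil => rfl
  | cons c l ih =>
    simp only [List.foldl_cons, List.scanl_cons, List.zip_cons_cons]
    by_cases hA : c = 'A'
    · have hG : ¬ c = 'G' := by subst hA; decide
      simp [hA, ih]
    · by_cases hG : c = 'G' <;> simp [hA, ih]

-- ===== VERDICT (by name: the statement is the Claim_ definition above) =====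
theorem special_subsequences_spec : Claim_equal_special_subsequences := by
  intro s _
  unfold Spec_special_subsequences special_subsequences special_subsequences_alt pvPrefixA
  simp only [pv_fold_eq]
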